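-- pv_equiv track=rewrite | github.com/catalin-h/python-ws | dynamic-programming/max_product_subarray/product.py | find_non_zero_chunks
-- ===== SOURCE A (Python) =====
-- def find_non_zero_chunks(numbers: list[int]):
--     chunk = []
--
--     for n in numbers + [0]:
--         if n == 0:
--             yield chunk
--             chunk = []
--         else:
--             chunk.append(n)
-- ===== SOURCE B (Python) =====
-- def find_non_zero_chunks(numbers: list[int]):
--     zeros = [i for i, n in enumerate(numbers) if n == 0]
--     prev = -1
--     for i in zeros:
--         yield numbers[prev + 1:i]
--         prev = i
--     yield numbers[prev + 1:]
-- ===== Notes on version B (the rewrite author's own statement) =====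
-- stated objective: alternative
-- what changed: B first collects the indices of all zeros and then yields each chunk as a slice between consecutive zero indices plus the trailing slice, instead of A's single pass that grows a chunk element by element and resets it at each zero (with an appended sentinel zero).
import Mathlib
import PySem

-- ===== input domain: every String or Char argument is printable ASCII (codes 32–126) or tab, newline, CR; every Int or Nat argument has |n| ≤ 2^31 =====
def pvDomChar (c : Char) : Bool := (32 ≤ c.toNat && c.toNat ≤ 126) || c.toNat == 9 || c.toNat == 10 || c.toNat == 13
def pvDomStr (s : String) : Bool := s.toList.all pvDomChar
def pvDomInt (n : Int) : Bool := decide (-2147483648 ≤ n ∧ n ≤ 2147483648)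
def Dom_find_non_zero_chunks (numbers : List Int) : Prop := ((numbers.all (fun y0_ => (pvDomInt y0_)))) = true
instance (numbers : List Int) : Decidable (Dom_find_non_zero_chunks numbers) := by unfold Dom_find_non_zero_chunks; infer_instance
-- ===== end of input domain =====

-- B collects the zero indices first and emits each chunk as a slice between consecutive
-- zero indices (alternative decomposition; same cost). Both are generators in Python;
-- the ports return the list of yielded chunks.


-- ===== PORT A =====
-- for n in numbers + [0]: if n == 0: yield chunk; chunk = [] else: chunk.append(n)
def find_non_zero_chunks (numbers : List Int) : List (List Int) :=
  ((numbers ++ [0]).foldl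
    (fun (st : List (List Int) × List Int) n =>
      if n == 0 then (st.1 ++ [st.2], []) else (st.1, st.2 ++ [n]))
    ([], [])).1

-- ===== PORT B =====
-- zeros = [i for i, n in enumerate(numbers) if n == 0]; then slice between consecutive zeros
def find_non_zero_chunks_alt (numbers : List Int) : List (List Int) :=
  let zeros : List Int :=
    (PySem.List.enumerate numbers).filterMap
      (fun p => if p.2 == 0 then some p.1 else none)
  let r := zeros.foldl
    (fun (st : List (List Int) × Int) i =>
      (st.1 ++ [PySem.List.slice numbers (some (st.2 + 1)) (some i)], i))
    ([], -1)
  r.1 ++ [PySem.List.slice numbers (some (r.2 + 1)) none]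

-- ===== PRECONDITION & SPEC =====
def Spec_find_non_zero_chunks (numbers : List Int) (out : List (List Int)) : Prop := out = find_non_zero_chunks_alt numbers
instance (numbers : List Int) (out : List (List Int)) : Decidable (Spec_find_non_zero_chunks numbers out) := by unfold Spec_find_non_zero_chunks; infer_instance

-- ===== CLAIM (what is proved, stated in full; the proofs are below) =====
def Claim_equal_find_non_zero_chunks : Prop := ∀ (numbers : List Int), Dom_find_non_zero_chunks numbers → Spec_find_non_zero_chunks numbers (find_non_zero_chunks numbers)

-- ===== LEMMAS AND PROOFS =====

-- common reference recursion: chunks of l, with pending chunk `chunk`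
def pvG (chunk : List Int) (l : List Int) : List (List Int) :=
  match l with
  | [] => [chunk]
  | n :: t => if n = 0 then chunk :: pvG [] t else pvG (chunk ++ [n]) t

-- A's fold equals pvG
lemma pvA_fold (l : List Int) : ∀ (out : List (List Int)) (chunk : List Int),
    ((l ++ [0]).foldl
      (fun (st : List (List Int) × List Int) n =>
        if n == 0 then (st.1 ++ [st.2], []) else (st.1, st.2 ++ [n]))
      (out, chunk)).1 = out ++ pvG chunk l := by
  induction l with
  | nil => intro out chunk; simp [pvG]
  | cons n t ih =>
    intro out chunk
    simp only [List.cons_append, List.foldl_cons]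
    by_cases hn : n = 0
    · rw [if_pos (by simp [hn]), ih]; simp [pvG, hn]
    · rw [if_neg (by simp [hn]), ih]; simp [pvG, hn]

-- zeros of a suffix, indices starting at s
lemma pvZeros_cons (n : Int) (t : List Int) (s : Int) :
    (PySem.List.enumerate (n :: t) s).filterMap
      (fun p => if p.2 == 0 then some p.1 else none)
    = (if n = 0 then [s] else []) ++
      (PySem.List.enumerate t (s + 1)).filterMap
        (fun p => if p.2 == 0 then some p.1 else none) := by
  by_cases hn : n = 0 <;> simp [PySem.List.enumerate_cons, hn]

-- B's fold + final slice equals pvG, generalized over suffix position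
lemma pvB_fold (full : List Int) : ∀ (t : List Int) (s c : Nat) (acc : List (List Int)),
    c ≤ s → s ≤ full.length → t = full.drop s →
    (let r := ((PySem.List.enumerate t (s : Int)).filterMap
        (fun p => if p.2 == 0 then some p.1 else none)).foldl
      (fun (st : List (List Int) × Int) i =>
        (st.1 ++ [PySem.List.slice full (some (st.2 + 1)) (some i)], i))
      (acc, (c : Int) - 1)
     r.1 ++ [PySem.List.slice full (some (r.2 + 1)) none])
    = acc ++ pvG ((full.drop c).take (s - c)) t := by
  intro t
  induction t with
  | nil =>
    intro s c acc hcs hs ht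
    have hsl : s = full.length := by
      have := congrArg List.length ht
      simp at this; omega
    simp only [PySem.List.enumerate_nil, List.filterMap_nil, List.foldl_nil]
    have h1 : (c : Int) - 1 + 1 = (c : Int) := by ring
    rw [h1, PySem.List.slice_some_none]
    have h2 : PySem.List.clampIdx full.length (c : Int) = c := by
      rw [PySem.List.clampIdx_natCast]; omega
    rw [h2]
    have h3 : (full.drop c).take (s - c) = full.drop c := by
      apply List.take_of_length_le
      simp [hsl]
    simp [pvG, h3]
  | cons n t ih =>
    intro s c acc hcs hs ht
    have hlen : s < full.length := by
      by_contra h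
      rw [List.drop_eq_nil_of_le (by omega)] at ht
      exact absurd ht (by simp)
    have hget : full[s]'hlen = n := by
      have h0 : (full.drop s)[0]? = some n := by rw [← ht]; rfl
      rw [List.getElem?_drop] at h0
      simpa [List.getElem?_eq_getElem (by simpa using hlen)] using h0
    have hdrop : t = full.drop (s + 1) := by
      have := congrArg (List.drop 1) ht
      simpa [List.drop_drop, Nat.add_comm] using this
    rw [pvZeros_cons]
    by_cases hn : n = 0
    · -- zero at index s: emit current chunk, reset
      rw [if_pos hn]
      simp only [List.singleton_append, List.foldl_cons]
      have h1 : (c : Int) - 1 + 1 = (c : Int) := by ring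
      have hslice : PySem.List.slice full (some (c : Int)) (some (s : Int))
          = (full.drop c).take (s - c) := by
        rw [PySem.List.slice_toNat full (Int.natCast_nonneg c) (Int.natCast_nonneg s)]
        simp
      rw [h1, hslice]
      have hih := ih (s + 1) (s + 1) (acc ++ [(full.drop c).take (s - c)])
        (le_refl _) (by omega) hdrop
      simp only [Nat.cast_add, Nat.cast_one, add_sub_cancel_right, Nat.sub_self,
        List.take_zero] at hih
      rw [hih]
      simp [pvG, hn]
    · -- nonzero: chunk grows by n
      rw [if_neg hn]
      simp only [List.nil_append]
      have hih := ih (s + 1) c acc (by omega) (by omega) hdrop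
      simp only [Nat.cast_add, Nat.cast_one] at hih
      rw [hih]
      have hchunk : (full.drop c).take (s + 1 - c) = (full.drop c).take (s - c) ++ [n] := by
        have hidx : (full.drop c)[s - c]? = some n := by
          rw [List.getElem?_drop]
          have hcc : c + (s - c) = s := by omega
          rw [hcc, List.getElem?_eq_getElem hlen, hget]
        have hsucc : s + 1 - c = (s - c) + 1 := by omega
        rw [hsucc, List.take_add_one, hidx]
        simp
      rw [hchunk]
      simp [pvG, hn]

lemma pvA_eq_pvG (numbers : List Int) : find_non_zero_chunks numbers = pvG [] numbers := by
  unfold find_non_zero_chunks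
  simpa using pvA_fold numbers [] []

lemma pvB_eq_pvG (numbers : List Int) : find_non_zero_chunks_alt numbers = pvG [] numbers := by
  unfold find_non_zero_chunks_alt
  have := pvB_fold numbers numbers 0 0 [] (le_refl _) (by omega) (by simp)
  simpa using this

-- ===== VERDICT (by name: the statement is the Claim_ definition above) =====
theorem find_non_zero_chunks_spec : Claim_equal_find_non_zero_chunks := by
  intro numbers _
  unfold Spec_find_non_zero_chunks
  rw [pvA_eq_pvG, pvB_eq_pvG]
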